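-- pv_equiv track=rewrite | github.com/mohammadfaiizan/ProjectI | DSA/Problem/Trie/05_Trie_Based_Dynamic_Programming/Advanced_String_Reconstruction.py | reconstruct_with_wildcards
-- ===== SOURCE A (Python) =====
-- from typing import List, Dict, Set, Tuple, Optional, Any
--
-- class TrieNode:
--     """Enhanced trie node for advanced reconstruction"""
--     def __init__(self):
--         self.children = {}
--         self.is_word = False
--         self.word = ""
--         self.frequency = 0
--         self.sources = set()  # Track sources that contributed this pattern
--         self.confidence = 1.0  # Confidence score for probabilistic reconstruction
--
-- def reconstruct_with_wildcards(pattern: str, dictionary: List[str],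
--                              wildcard: str = '*') -> List[str]:
--     """
--     Approach 2: Reconstruct with Wildcards
--
--     Reconstruct strings matching pattern with wildcards.
--
--     Time: O(d * p) where d=dictionary size, p=pattern length
--     Space: O(d * p)
--     """
--     # Build trie from dictionary
--     dict_root = TrieNode()
--
--     for word in dictionary:
--         node = dict_root
--         for char in word:
--             if char not in node.children:
--                 node.children[char] = TrieNode()
--             node = node.children[char]
--         node.is_word = True
--         node.word = word
--
--     # DP matching with wildcards
--     def matches_pattern(word: str, pattern: str) -> bool:
--         """Check if word matches pattern with wildcards"""
--         m, n = len(word), len(pattern)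
--
--         # dp[i][j] = True if word[:i] matches pattern[:j]
--         dp = [[False] * (n + 1) for _ in range(m + 1)]
--         dp[0][0] = True
--
--         # Handle leading wildcards
--         for j in range(1, n + 1):
--             if pattern[j - 1] == wildcard:
--                 dp[0][j] = dp[0][j - 1]
--
--         for i in range(1, m + 1):
--             for j in range(1, n + 1):
--                 if pattern[j - 1] == wildcard:
--                     # Wildcard can match empty or any character
--                     dp[i][j] = dp[i][j - 1] or dp[i - 1][j] or dp[i - 1][j - 1]
--                 elif word[i - 1] == pattern[j - 1]:
--                     dp[i][j] = dp[i - 1][j - 1]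
--
--         return dp[m][n]
--
--     results = []
--     for word in dictionary:
--         if matches_pattern(word, pattern):
--             results.append(word)
--
--     return results
-- ===== SOURCE B (Python) =====
-- def reconstruct_with_wildcards(pattern, dictionary, wildcard='*'):
--     """Trie-walk DP: build a prefix trie of the dictionary, run the wildcard DP
--     once per trie node so words sharing a prefix share DP rows, collect the
--     matching words in a set, and filter the dictionary by that set."""
--     n = len(pattern)
--
--     # shared-prefix trie: node = [is_word, {char: child}]
--     root = [False, {}]
--     for w in dictionary:
--         node = root
--         for ch in w:
--             if ch not in node[1]:
--                 node[1][ch] = [False, {}]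
--             node = node[1][ch]
--         node[0] = True
--
--     def start_row():
--         row = [True]
--         for j in range(n):
--             row.append(row[j] and pattern[j] == wildcard)
--         return row
--
--     def step(row, ch):
--         new = [False]
--         for j in range(n):
--             if pattern[j] == wildcard:
--                 new.append(new[j] or row[j + 1] or row[j])
--             elif pattern[j] == ch:
--                 new.append(row[j])
--             else:
--                 new.append(False)
--         return new
--
--     matched = set()
--
--     def walk(node, prefix, row):
--         if node[0] and row[n]:
--             matched.add(''.join(prefix))
--         for ch, child in node[1].items():
--             walk(child, prefix + [ch], step(row, ch))
--
--     walk(root, [], start_row())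
--     return [w for w in dictionary if w in matched]
-- ===== Notes on version B (the rewrite author's own statement) =====
-- stated objective: faster
-- what changed: B replaces A's per-word (m+1)x(n+1) DP table (plus a trie A builds but never reads) by one DFS over a real prefix trie of the dictionary: the wildcard DP row is computed once per trie node so words sharing a prefix share rows, matches are collected in a set and the dictionary is filtered by membership.
import Mathlib
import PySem

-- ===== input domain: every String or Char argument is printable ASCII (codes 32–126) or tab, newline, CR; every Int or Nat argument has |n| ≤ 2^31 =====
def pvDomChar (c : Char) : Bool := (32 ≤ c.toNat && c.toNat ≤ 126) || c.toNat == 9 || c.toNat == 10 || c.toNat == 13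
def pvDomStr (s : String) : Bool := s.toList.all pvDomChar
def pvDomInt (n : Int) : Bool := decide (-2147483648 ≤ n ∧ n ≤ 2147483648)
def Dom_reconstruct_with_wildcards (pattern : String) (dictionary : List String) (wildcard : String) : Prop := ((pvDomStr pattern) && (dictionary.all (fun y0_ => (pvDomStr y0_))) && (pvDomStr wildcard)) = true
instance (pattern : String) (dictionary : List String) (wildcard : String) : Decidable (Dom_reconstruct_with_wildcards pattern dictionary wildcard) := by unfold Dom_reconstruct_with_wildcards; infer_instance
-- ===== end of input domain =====

-- B replaces A's per-word 2-D DP tables by one DFS over a prefix trie of the dictionary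
-- (words sharing a prefix share DP rows), collecting matches in a set; equal return value proved.

-- ===== PORT A =====
-- A's TrieNode graph is ported as a flat arena: node = (children as Dict Char Nat of
-- arena indices, is_word, word); A never reads the trie, but it is built faithfully.
def pvTrieNode0 : PySem.Dict Char Nat × Bool × String := (PySem.Dict.empty, false, "")

def pvTrieInsert (nodes : List (PySem.Dict Char Nat × Bool × String)) (w : String) :
    List (PySem.Dict Char Nat × Bool × String) :=
  let st := w.toList.foldl (fun (st : List (PySem.Dict Char Nat × Bool × String) × Nat) c =>
    let node := st.1.getD st.2 pvTrieNode0
    match node.1.get? c with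
    | some i => (st.1, i)
    | none =>
        let ni := st.1.length
        ((st.1.set st.2 (node.1.insert c ni, node.2.1, node.2.2)) ++ [pvTrieNode0], ni))
    (nodes, 0)
  let node := st.1.getD st.2 pvTrieNode0
  st.1.set st.2 (node.1, true, w)

-- pattern[j-1] == wildcard: a 1-character string compared with the wildcard string
def pvWcEq (c : Char) (wc : String) : Bool := wc.toList == [c]

def pvGet2 (dp : List (List Bool)) (i j : Nat) : Bool := (dp.getD i []).getD j false
def pvSet2 (dp : List (List Bool)) (i j : Nat) (v : Bool) : List (List Bool) :=
  dp.set i ((dp.getD i []).set j v)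

-- A's matches_pattern: full (m+1)×(n+1) DP table built by index loops
def pvMatchesPattern (word pattern : String) (wc : String) : Bool :=
  let w := word.toList
  let p := pattern.toList
  let m := w.length
  let n := p.length
  let dp := List.replicate (m+1) (List.replicate (n+1) false)
  let dp := pvSet2 dp 0 0 true
  let dp := (List.range' 1 n).foldl (fun dp j =>
      if pvWcEq (p.getD (j-1) ' ') wc then pvSet2 dp 0 j (pvGet2 dp 0 (j-1)) else dp) dp
  let dp := (List.range' 1 m).foldl (fun dp i =>
      (List.range' 1 n).foldl (fun dp j =>
        if pvWcEq (p.getD (j-1) ' ') wc then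
          pvSet2 dp i j (pvGet2 dp i (j-1) || pvGet2 dp (i-1) j || pvGet2 dp (i-1) (j-1))
        else if w.getD (i-1) ' ' == p.getD (j-1) ' ' then
          pvSet2 dp i j (pvGet2 dp (i-1) (j-1))
        else dp) dp) dp
  pvGet2 dp m n

def reconstruct_with_wildcards (pattern : String) (dictionary : List String) (wildcard : String) : List String :=
  let _dictRoot := dictionary.foldl pvTrieInsert [pvTrieNode0]
  dictionary.foldl (fun res w =>
    if pvMatchesPattern w pattern wildcard then res ++ [w] else res) []

-- ===== PORT B =====
-- Source B's trie node [is_word, {char: child}]: a mutual inductive (no nested inductive)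
mutual
inductive PTrie : Type where
  | mk : Bool → PKids → PTrie
  deriving Repr
inductive PKids : Type where
  | knil : PKids
  | kcons : Char → PTrie → PKids → PKids
  deriving Repr
end

-- node[1].get(ch): first entry with that char (chars are unique in a built trie)
def pvKidsGet : PKids → Char → Option PTrie
  | .knil, _ => none
  | .kcons c t k, c' => if c = c' then some t else pvKidsGet k c'

-- write back the child at ch (replace in place; append at the end if absent — dict order)
def pvKidsSet : PKids → Char → PTrie → PKids
  | .knil, c, t => .kcons c t .knil
  | .kcons c' t' k, c, t => if c' = c then .kcons c' t k else .kcons c' t' (pvKidsSet k c t)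

-- Source B's insertion loop, as recursion over the word's characters
def pvInsertT : PTrie → List Char → PTrie
  | .mk _ kids, [] => .mk true kids
  | .mk b kids, c :: cs =>
      let child := (pvKidsGet kids c).getD (.mk false .knil)
      .mk b (pvKidsSet kids c (pvInsertT child cs))

-- start_row: row[j+1] = row[j] and pattern[j] == wildcard
def pvRow0B (p : List Char) (wc : String) : List Bool :=
  (List.range p.length).foldl
    (fun row j => row ++ [row.getD j false && pvWcEq (p.getD j ' ') wc]) [true]

-- step: one DP row update for character ch
def pvStepB (p : List Char) (wc : String) (row : List Bool) (ch : Char) : List Bool :=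
  (List.range p.length).foldl
    (fun new j => new ++
      [if pvWcEq (p.getD j ' ') wc then
         (new.getD j false || row.getD (j+1) false || row.getD j false)
       else if p.getD j ' ' == ch then row.getD j false
       else false]) [false]

-- walk(node, prefix, row): DFS over the trie, adding matched words to the set
mutual
def pvWalk (p : List Char) (wc : String) : PTrie → List Char → List Bool → PySem.Set String → PySem.Set String
  | .mk b kids, pre, row, acc =>
      let acc := if b && row.getD p.length false then PySem.Set.add acc (String.ofList pre) else acc
      pvWalkK p wc kids pre row acc
def pvWalkK (p : List Char) (wc : String) : PKids → List Char → List Bool → PySem.Set String → PySem.Set String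
  | .knil, _, _, acc => acc
  | .kcons c t k, pre, row, acc =>
      pvWalkK p wc k pre row (pvWalk p wc t (pre ++ [c]) (pvStepB p wc row c) acc)
end

def reconstruct_with_wildcards_alt (pattern : String) (dictionary : List String) (wildcard : String) : List String :=
  let p := pattern.toList
  let root := dictionary.foldl (fun t w => pvInsertT t w.toList) (.mk false .knil)
  let matched := pvWalk p wildcard root [] (pvRow0B p wildcard) PySem.Set.empty
  dictionary.filter (fun w => PySem.Set.contains matched w)

-- ===== PRECONDITION & SPEC =====
def Spec_reconstruct_with_wildcards (pattern : String) (dictionary : List String) (wildcard : String) (out : List String) : Prop := out = reconstruct_with_wildcards_alt pattern dictionary wildcard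
instance (pattern : String) (dictionary : List String) (wildcard : String) (out : List String) : Decidable (Spec_reconstruct_with_wildcards pattern dictionary wildcard out) := by unfold Spec_reconstruct_with_wildcards; infer_instance

-- ===== CLAIM (what is proved, stated in full; the proofs are below) =====
def Claim_equal_reconstruct_with_wildcards : Prop := ∀ (pattern : String) (dictionary : List String) (wildcard : String), Dom_reconstruct_with_wildcards pattern dictionary wildcard → Spec_reconstruct_with_wildcards pattern dictionary wildcard (reconstruct_with_wildcards pattern dictionary wildcard)

-- ===== LEMMAS AND PROOFS =====

-- length of any fold that appends exactly one element per item
theorem pvFoldAppendOneLen {α β : Type} (g : List α → β → α) :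
    ∀ (l : List β) (r : List α),
      (l.foldl (fun row x => row ++ [g row x]) r).length = r.length + l.length := by
  intro l
  induction l with
  | nil => intro r; simp
  | cons x xs ih => intro r; simp [List.foldl_cons, ih]; omega

theorem pvTakeSucc (p : List Char) (k : Nat) (h : k < p.length) :
    p.take (k+1) = p.take k ++ [p.getD k ' '] := by
  rw [List.take_add_one, List.getElem?_eq_getElem h, List.getD_eq_getElem _ _ h]
  simp

theorem pvSetAppend {α : Type} (l1 l2 : List α) (t : Nat) (v : α) :
    (l1 ++ l2).set (l1.length + t) v = l1 ++ l2.set t v := by simp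

theorem pvGetDAppendAt {α : Type} (l1 l2 : List α) (n : Nat) (d : α)
    (h : l1.length = n) : (l1 ++ l2).getD n d = l2.getD 0 d := by
  rw [List.getD_eq_getElem?_getD, List.getElem?_append_right (by omega),
    List.getD_eq_getElem?_getD, h]
  simp

theorem pvSetAppendAt {α : Type} (l1 l2 : List α) (n : Nat) (v : α)
    (h : l1.length = n) : (l1 ++ l2).set n v = l1 ++ l2.set 0 v := by
  rw [← h, ← Nat.add_zero l1.length, pvSetAppend]

theorem pvRangeSucc (k : Nat) : List.range' 1 (k+1) = List.range' 1 k ++ [1+k] := by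
  rw [List.range'_concat]; norm_num

theorem pvGetDMapRange {f : Nat → List Bool} {s i : Nat} (h : i < s) :
    ((List.range s).map f).getD i [] = f i := by
  simp [List.getD, h]

-- partial versions of B's two row builders (first k of the n iterations)
def pvRow0P (p : List Char) (wc : String) (k : Nat) : List Bool :=
  (List.range k).foldl
    (fun row j => row ++ [row.getD j false && pvWcEq (p.getD j ' ') wc]) [true]

def pvStepP (p : List Char) (wc : String) (row : List Bool) (ch : Char) (k : Nat) : List Bool :=
  (List.range k).foldl
    (fun new j => new ++
      [if pvWcEq (p.getD j ' ') wc then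
         (new.getD j false || row.getD (j+1) false || row.getD j false)
       else if p.getD j ' ' == ch then row.getD j false
       else false]) [false]

theorem pvRow0P_full (p : List Char) (wc : String) : pvRow0P p wc p.length = pvRow0B p wc := rfl

theorem pvStepP_full (p : List Char) (wc : String) (row : List Bool) (ch : Char) :
    pvStepP p wc row ch p.length = pvStepB p wc row ch := rfl

theorem pvRow0P_len (p : List Char) (wc : String) (k : Nat) : (pvRow0P p wc k).length = k + 1 := by
  simpa [pvRow0P, Nat.add_comm] using
    pvFoldAppendOneLen (fun row j => row.getD j false && pvWcEq (p.getD j ' ') wc) (List.range k) [true]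

theorem pvStepP_len (p : List Char) (wc : String) (row : List Bool) (ch : Char) (k : Nat) :
    (pvStepP p wc row ch k).length = k + 1 := by
  simpa [pvStepP, Nat.add_comm] using
    pvFoldAppendOneLen (fun new j => if pvWcEq (p.getD j ' ') wc then
         (new.getD j false || row.getD (j+1) false || row.getD j false)
       else if p.getD j ' ' == ch then row.getD j false
       else false) (List.range k) [false]

theorem pvRow0P_succ (p : List Char) (wc : String) (k : Nat) :
    pvRow0P p wc (k+1) =
      pvRow0P p wc k ++ [(pvRow0P p wc k).getD k false && pvWcEq (p.getD k ' ') wc] := by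
  rw [pvRow0P, pvRow0P, List.range_succ, List.foldl_append]
  simp

theorem pvStepP_succ (p : List Char) (wc : String) (row : List Bool) (ch : Char) (k : Nat) :
    pvStepP p wc row ch (k+1) =
      pvStepP p wc row ch k ++
        [if pvWcEq (p.getD k ' ') wc then
           ((pvStepP p wc row ch k).getD k false || row.getD (k+1) false || row.getD k false)
         else if p.getD k ' ' == ch then row.getD k false
         else false] := by
  rw [pvStepP, pvStepP, List.range_succ, List.foldl_append]
  simp

-- B's rows, as functions of the word-prefix length
def pvRowsB (p : List Char) (wc : String) (w : List Char) (i : Nat) : List Bool :=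
  (w.take i).foldl (pvStepB p wc) (pvRow0B p wc)

theorem pvRowsB_succ (p : List Char) (wc : String) (w : List Char) (i : Nat) (h : i < w.length) :
    pvRowsB p wc w (i+1) = pvStepB p wc (pvRowsB p wc w i) (w.getD i ' ') := by
  rw [pvRowsB, pvRowsB, pvTakeSucc w i h, List.foldl_append]
  simp

-- first loop of A: row 0 of the table is pvRow0P, padded with the untouched falses
theorem pvLoop0 (p : List Char) (wc : String) (m : Nat) (k : Nat) (hk : k ≤ p.length) :
    (List.range' 1 k).foldl (fun dp j =>
        if pvWcEq (p.getD (j-1) ' ') wc then pvSet2 dp 0 j (pvGet2 dp 0 (j-1)) else dp)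
      (pvSet2 (List.replicate (m+1) (List.replicate (p.length+1) false)) 0 0 true)
      = (pvRow0P p wc k ++ List.replicate (p.length - k) false)
          :: List.replicate m (List.replicate (p.length+1) false) := by
  induction k with
  | zero => simp [pvSet2, pvGet2, pvRow0P, List.replicate_succ]
  | succ k ih =>
      have hlt : k < p.length := by omega
      have h1k : 1 + k - 1 = k := by omega
      have hlen : (pvRow0P p wc k).length = k + 1 := pvRow0P_len p wc k
      rw [pvRangeSucc, List.foldl_append, ih (by omega)]
      simp only [List.foldl_cons, List.foldl_nil, h1k]
      rw [pvRow0P_succ]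
      by_cases hwc : pvWcEq (p.getD k ' ') wc = true
      · rw [if_pos hwc, hwc, Bool.and_true]
        have hget : pvGet2 ((pvRow0P p wc k ++ List.replicate (p.length - k) false)
            :: List.replicate m (List.replicate (p.length+1) false)) 0 k
            = (pvRow0P p wc k).getD k false := by
          simp only [pvGet2, List.getD_cons_zero]
          exact List.getD_append _ _ _ _ (by omega)
        rw [hget]
        simp only [pvSet2, List.getD_cons_zero, List.set_cons_zero]
        rw [show 1 + k = (pvRow0P p wc k).length + 0 by rw [hlen]; omega, pvSetAppend]
        rw [show p.length - k = (p.length - (k+1)) + 1 by omega, List.replicate_succ,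
          List.set_cons_zero]
        simp
      · rw [if_neg hwc]
        rw [show pvWcEq (p.getD k ' ') wc = false from by
          cases h : pvWcEq (p.getD k ' ') wc
          · rfl
          · exact absurd h hwc]
        rw [Bool.and_false]
        rw [show p.length - k = (p.length - (k+1)) + 1 by omega, List.replicate_succ]
        simp

-- inner loop of A at outer index i+1
theorem pvLoopInner (p : List Char) (wc : String) (w : List Char) (i : Nat)
    (hi : i < w.length) (k : Nat) (hk : k ≤ p.length) :
    (List.range' 1 k).foldl (fun dp j =>
        if pvWcEq (p.getD (j-1) ' ') wc then
          pvSet2 dp (i+1) j (pvGet2 dp (i+1) (j-1) || pvGet2 dp i j || pvGet2 dp i (j-1))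
        else if w.getD i ' ' == p.getD (j-1) ' ' then
          pvSet2 dp (i+1) j (pvGet2 dp i (j-1))
        else dp)
      ((List.range (i+1)).map (pvRowsB p wc w) ++
        List.replicate (w.length - i) (List.replicate (p.length+1) false))
      = (List.range (i+1)).map (pvRowsB p wc w) ++
          ((pvStepP p wc (pvRowsB p wc w i) (w.getD i ' ') k ++ List.replicate (p.length - k) false)
            :: List.replicate (w.length - i - 1) (List.replicate (p.length+1) false)) := by
  induction k with
  | zero =>
      rw [show w.length - i = (w.length - i - 1) + 1 by omega, List.replicate_succ]
      simp [pvStepP, List.replicate_succ]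
  | succ k ih =>
      have hlt : k < p.length := by omega
      have h1k : 1 + k - 1 = k := by omega
      have hlenM : ((List.range (i+1)).map (pvRowsB p wc w)).length = i + 1 := by simp
      have hlenR : (pvStepP p wc (pvRowsB p wc w i) (w.getD i ' ') k).length = k + 1 :=
        pvStepP_len p wc _ _ k
      rw [pvRangeSucc, List.foldl_append, ih (by omega)]
      simp only [List.foldl_cons, List.foldl_nil, h1k]
      rw [Nat.add_comm 1 k]
      have hmid : (((List.range (i+1)).map (pvRowsB p wc w) ++
          ((pvStepP p wc (pvRowsB p wc w i) (w.getD i ' ') k ++ List.replicate (p.length - k) false)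
            :: List.replicate (w.length - i - 1) (List.replicate (p.length+1) false)))).getD (i+1) []
          = pvStepP p wc (pvRowsB p wc w i) (w.getD i ' ') k ++ List.replicate (p.length - k) false := by
        rw [pvGetDAppendAt _ _ _ _ hlenM]
        simp
      have hprev : (((List.range (i+1)).map (pvRowsB p wc w) ++
          ((pvStepP p wc (pvRowsB p wc w i) (w.getD i ' ') k ++ List.replicate (p.length - k) false)
            :: List.replicate (w.length - i - 1) (List.replicate (p.length+1) false)))).getD i []
          = pvRowsB p wc w i := by
        rw [List.getD_append _ _ _ _ (by rw [hlenM]; omega)]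
        exact pvGetDMapRange (by omega)
      have hgetmid : pvGet2 ((List.range (i+1)).map (pvRowsB p wc w) ++
          ((pvStepP p wc (pvRowsB p wc w i) (w.getD i ' ') k ++ List.replicate (p.length - k) false)
            :: List.replicate (w.length - i - 1) (List.replicate (p.length+1) false))) (i+1) k
          = (pvStepP p wc (pvRowsB p wc w i) (w.getD i ' ') k).getD k false := by
        simp only [pvGet2, hmid]
        exact List.getD_append _ _ _ _ (by omega)
      have hsetmid : ∀ v : Bool, pvSet2 ((List.range (i+1)).map (pvRowsB p wc w) ++
          ((pvStepP p wc (pvRowsB p wc w i) (w.getD i ' ') k ++ List.replicate (p.length - k) false)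
            :: List.replicate (w.length - i - 1) (List.replicate (p.length+1) false))) (i+1) (k+1) v
          = (List.range (i+1)).map (pvRowsB p wc w) ++
            ((pvStepP p wc (pvRowsB p wc w i) (w.getD i ' ') k ++ (v :: List.replicate (p.length - (k+1)) false))
              :: List.replicate (w.length - i - 1) (List.replicate (p.length+1) false)) := by
        intro v
        simp only [pvSet2, hmid]
        rw [pvSetAppendAt _ _ _ _ hlenM, List.set_cons_zero,
          pvSetAppendAt _ _ _ _ hlenR]
        rw [show p.length - k = (p.length - (k+1)) + 1 by omega, List.replicate_succ,
          List.set_cons_zero]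
      rw [pvStepP_succ]
      by_cases hwc : pvWcEq (p.getD k ' ') wc = true
      · rw [if_pos hwc, if_pos hwc]
        simp only [pvGet2, hmid, hprev] at *
        rw [hsetmid, hgetmid]
        simp
      · rw [if_neg hwc, if_neg hwc]
        by_cases hch : w.getD i ' ' = p.getD k ' '
        · have hc1 : (w.getD i ' ' == p.getD k ' ') = true := beq_iff_eq.mpr hch
          have hc2 : (p.getD k ' ' == w.getD i ' ') = true := beq_iff_eq.mpr hch.symm
          simp only [hc1, if_true, hc2]
          simp only [pvGet2, hprev]
          rw [hsetmid]
          simp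
        · have hc1 : (w.getD i ' ' == p.getD k ' ') = false := beq_eq_false_iff_ne.mpr hch
          have hc2 : (p.getD k ' ' == w.getD i ' ') = false :=
            beq_eq_false_iff_ne.mpr (Ne.symm hch)
          simp only [hc1, hc2, Bool.false_eq_true, if_false]
          rw [show p.length - k = (p.length - (k+1)) + 1 by omega, List.replicate_succ]
          simp

-- outer loop of A
theorem pvLoopOuter (p : List Char) (wc : String) (w : List Char) (i : Nat) (hi : i ≤ w.length) :
    (List.range' 1 i).foldl (fun dp i' =>
        (List.range' 1 p.length).foldl (fun dp j =>
          if pvWcEq (p.getD (j-1) ' ') wc then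
            pvSet2 dp i' j (pvGet2 dp i' (j-1) || pvGet2 dp (i'-1) j || pvGet2 dp (i'-1) (j-1))
          else if w.getD (i'-1) ' ' == p.getD (j-1) ' ' then
            pvSet2 dp i' j (pvGet2 dp (i'-1) (j-1))
          else dp) dp)
      ((pvRow0P p wc p.length ++ List.replicate 0 false)
        :: List.replicate w.length (List.replicate (p.length+1) false))
      = (List.range (i+1)).map (pvRowsB p wc w) ++
          List.replicate (w.length - i) (List.replicate (p.length+1) false) := by
  induction i with
  | zero => simp [pvRowsB, pvRow0P_full]
  | succ i ih =>
      have hi' : i < w.length := by omega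
      rw [pvRangeSucc, List.foldl_append, ih (by omega)]
      simp only [List.foldl_cons, List.foldl_nil]
      rw [Nat.add_comm 1 i]
      simp only [Nat.add_sub_cancel]
      rw [pvLoopInner p wc w i hi' p.length le_rfl, pvStepP_full,
        ← pvRowsB_succ p wc w i hi']
      rw [show w.length - i - 1 = w.length - (i+1) by omega,
        List.range_succ (n := i+1)]
      simp

-- A's matcher equals the final entry of B's last row
theorem pvMatchEq (word pattern wc : String) :
    pvMatchesPattern word pattern wc =
      (word.toList.foldl (pvStepB pattern.toList wc) (pvRow0B pattern.toList wc)).getD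
        pattern.toList.length false := by
  unfold pvMatchesPattern
  dsimp only
  rw [pvLoop0 pattern.toList wc word.toList.length pattern.toList.length le_rfl]
  rw [Nat.sub_self]
  rw [pvLoopOuter pattern.toList wc word.toList word.toList.length le_rfl]
  rw [Nat.sub_self]
  simp only [pvGet2, List.replicate_zero, List.append_nil]
  rw [pvGetDMapRange (by omega)]
  rw [pvRowsB, List.take_length]

-- proof-side "any branch" trie membership (equals Source B's lookup on built tries)
mutual
def pvMemT : PTrie → List Char → Bool
  | .mk b _, [] => b
  | .mk _ kids, c :: cs => pvMemK kids c cs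
def pvMemK : PKids → Char → List Char → Bool
  | .knil, _, _ => false
  | .kcons c' t k, c, cs => ((c' == c) && pvMemT t cs) || pvMemK k c cs
end

theorem pvMemT_empty (w : List Char) : pvMemT (.mk false .knil) w = false := by
  cases w <;> simp [pvMemT, pvMemK]

theorem pvMemK_set_insert (c : Char) (cs : List Char) (c' : Char) (cs' : List Char)
    (IH : ∀ (t : PTrie) (w : List Char), pvMemT (pvInsertT t cs) w = (decide (w = cs) || pvMemT t w)) :
    (kids : PKids) →
      pvMemK (pvKidsSet kids c (pvInsertT ((pvKidsGet kids c).getD (.mk false .knil)) cs)) c' cs'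
        = (decide (c' :: cs' = c :: cs) || pvMemK kids c' cs')
  | .knil => by
      simp only [pvKidsGet, pvKidsSet, Option.getD_none, pvMemK]
      by_cases hc : c = c'
      · subst hc
        simp [IH, pvMemT_empty, List.cons.injEq]
      · have h1 : (c == c') = false := beq_eq_false_iff_ne.mpr hc
        have h2 : ¬ (c' = c) := fun h => hc h.symm
        simp [h1, h2]
  | .kcons a t0 k => by
      by_cases hac : a = c
      · subst hac
        simp only [pvKidsGet, pvKidsSet, pvMemK, if_true, Option.getD_some]
        rw [IH]
        by_cases hc : a = c'
        · subst hc
          simp [List.cons.injEq, Bool.or_assoc]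
        · have h1 : (a == c') = false := beq_eq_false_iff_ne.mpr hc
          have h2 : ¬ (c' = a) := fun h => hc h.symm
          simp [h1, h2]
      · simp only [pvKidsGet, pvKidsSet, if_neg hac, pvMemK]
        rw [pvMemK_set_insert c cs c' cs' IH k]
        simp only [Bool.or_left_comm]

theorem pvMemT_insert (v : List Char) : ∀ (t : PTrie) (w : List Char),
    pvMemT (pvInsertT t v) w = (decide (w = v) || pvMemT t w) := by
  induction v with
  | nil =>
      intro t w
      cases t with | mk b kids =>
      cases w with
      | nil => simp [pvInsertT, pvMemT]
      | cons c' cs' => simp [pvInsertT, pvMemT]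
  | cons c cs ih =>
      intro t w
      cases t with | mk b kids =>
      cases w with
      | nil => simp [pvInsertT, pvMemT]
      | cons c' cs' =>
          simp only [pvInsertT, pvMemT]
          exact pvMemK_set_insert c cs c' cs' ih kids

theorem pvMemT_fold (ws : List String) (t : PTrie) (cs : List Char) :
    pvMemT (ws.foldl (fun t w => pvInsertT t w.toList) t) cs
      = (ws.any (fun w => decide (w.toList = cs)) || pvMemT t cs) := by
  induction ws generalizing t with
  | nil => simp
  | cons w ws ih =>
      simp only [List.foldl_cons, ih, pvMemT_insert, List.any_cons]
      by_cases h : w.toList = cs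
      · simp [h]
      · have h2 : ¬ cs = w.toList := fun hc => h hc.symm
        simp [h, h2]

-- DFS characterisation: what ends up in the set
mutual
theorem pvWalk_mem (p : List Char) (wc : String) (t : PTrie) (pre : List Char)
    (row : List Bool) (acc : PySem.Set String) (s : String) :
    s ∈ pvWalk p wc t pre row acc ↔ s ∈ acc ∨ ∃ u, pvMemT t u = true ∧
      (u.foldl (pvStepB p wc) row).getD p.length false = true ∧ s = String.ofList (pre ++ u) := by
  cases t with
  | mk b kids =>
      show s ∈ pvWalkK p wc kids pre row
          (if b && row.getD p.length false then PySem.Set.add acc (String.ofList pre) else acc) ↔ _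
      rw [pvWalkK_mem]
      constructor
      · rintro (hin | ⟨c, cs, hm, hf, hs⟩)
        · by_cases hb : (b && row.getD p.length false) = true
          · rw [if_pos hb] at hin
            rcases (PySem.Set.mem_add acc (String.ofList pre) s).mp hin with h | h
            · exact Or.inl h
            · refine Or.inr ⟨[], ?_, ?_, ?_⟩
              · exact (Bool.and_eq_true _ _).mp hb |>.1
              · simpa using (Bool.and_eq_true _ _).mp hb |>.2
              · simpa using h
          · rw [if_neg hb] at hin
            exact Or.inl hin
        · exact Or.inr ⟨c :: cs, hm, hf, hs⟩
      · rintro (hin | ⟨u, hm, hf, hs⟩)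
        · left
          split
          · exact (PySem.Set.mem_add acc (String.ofList pre) s).mpr (Or.inl hin)
          · exact hin
        · cases u with
          | nil =>
              have hb : b = true := hm
              have hr : row.getD p.length false = true := by simpa using hf
              left
              rw [if_pos (by rw [hb, hr]; rfl)]
              exact (PySem.Set.mem_add acc (String.ofList pre) s).mpr
                (Or.inr (by simpa using hs))
          | cons c cs => exact Or.inr ⟨c, cs, hm, hf, hs⟩
theorem pvWalkK_mem (p : List Char) (wc : String) (k : PKids) (pre : List Char)
    (row : List Bool) (acc : PySem.Set String) (s : String) :
    s ∈ pvWalkK p wc k pre row acc ↔ s ∈ acc ∨ ∃ c cs, pvMemK k c cs = true ∧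
      ((c :: cs).foldl (pvStepB p wc) row).getD p.length false = true ∧
      s = String.ofList (pre ++ c :: cs) := by
  cases k with
  | knil =>
      simp [pvWalkK, pvMemK]
  | kcons c0 t0 k =>
      show s ∈ pvWalkK p wc k pre row (pvWalk p wc t0 (pre ++ [c0]) (pvStepB p wc row c0) acc) ↔ _
      rw [pvWalkK_mem, pvWalk_mem]
      constructor
      · rintro ((hin | ⟨u, hm, hf, hs⟩) | ⟨c, cs, hm, hf, hs⟩)
        · exact Or.inl hin
        · right
          exact ⟨c0, u, by simp [pvMemK, hm], by simpa [List.foldl_cons] using hf,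
            by simpa using hs⟩
        · right
          exact ⟨c, cs, by simp [pvMemK, hm], hf, hs⟩
      · rintro (hin | ⟨c, cs, hm, hf, hs⟩)
        · exact Or.inl (Or.inl hin)
        · simp only [pvMemK, Bool.or_eq_true, Bool.and_eq_true, beq_iff_eq] at hm
          rcases hm with ⟨hc, hm⟩ | hm
          · subst hc
            left; right
            exact ⟨cs, hm, by simpa [List.foldl_cons] using hf, by simpa using hs⟩
          · right
            exact ⟨c, cs, hm, hf, hs⟩
end

-- ===== VERDICT (by name: the statement is the Claim_ definition above) =====
theorem reconstruct_with_wildcards_spec : Claim_equal_reconstruct_with_wildcards := by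
  intro pattern dictionary wildcard _hdom
  unfold Spec_reconstruct_with_wildcards reconstruct_with_wildcards reconstruct_with_wildcards_alt
  dsimp only
  rw [PySem.List.foldl_append_if_eq_filter, List.nil_append]
  refine List.filter_congr ?_
  intro w hw
  rw [pvMatchEq, Bool.eq_iff_iff, PySem.Set.contains_iff, pvWalk_mem]
  constructor
  · intro hf
    refine Or.inr ⟨w.toList, ?_, hf, by simp [String.ofList_toList]⟩
    rw [pvMemT_fold]
    simp only [List.any_eq_true, Bool.or_eq_true, decide_eq_true_eq]
    exact Or.inl ⟨w, hw, rfl⟩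
  · rintro (hin | ⟨u, hm, hf, hs⟩)
    · simp [PySem.Set.empty] at hin
    · have hu : w.toList = u := by rw [hs]; simp [String.toList_ofList]
      rw [hu]
      exact hf
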